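-- pv_equiv track=rewrite | github.com/ArtZagvozkin/telegram_assist | telegram_bot/utils.py | _normalize_table_cell
-- ===== SOURCE A (Python) =====
-- from typing import List, Dict
--
-- def _normalize_table_cell(cell: str) -> str:
--     """
--     Внутри таблиц разрешаем пользовательское экранирование Markdown-символов:
--     \* -> *, \_ -> _, \# -> #, \[ -> [, \] -> ]
--     Но НЕ трогаем такие последовательности внутри inline-code (`...`).
--     """
--     ESCAPABLE = set("*_#[]")
--     result: List[str] = []
--     i = 0
--     n = len(cell)
--     in_code = False
--
--     while i < n:
--         ch = cell[i]
--
--         if ch == "`":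
--             in_code = not in_code
--             result.append(ch)
--             i += 1
--             continue
--
--         if not in_code and ch == "\\" and i + 1 < n and cell[i + 1] in ESCAPABLE:
--             # \* -> *
--             result.append(cell[i + 1])
--             i += 2
--             continue
--
--         result.append(ch)
--         i += 1
--
--     return "".join(result)
-- ===== SOURCE B (Python) =====
-- def _normalize_table_cell(cell: str) -> str:
--     # Split on backticks: even-indexed pieces are outside inline code and get
--     # unescaped; odd-indexed pieces are inside `...` and are kept verbatim.
--     def unescape(seg: str) -> str:
--         out = []
--         j = 0
--         n = len(seg)
--         while j < n:
--             ch = seg[j]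
--             if ch == "\\" and j + 1 < n and seg[j + 1] in "*_#[]":
--                 out.append(seg[j + 1])
--                 j += 2
--             else:
--                 out.append(ch)
--                 j += 1
--         return "".join(out)
--
--     parts = cell.split("`")
--     return "`".join(seg if k % 2 else unescape(seg) for k, seg in enumerate(parts))
-- ===== Notes on version B (the rewrite author's own statement) =====
-- stated objective: idiomatic
-- what changed: Replaces the single per-character state machine that toggles an in_code flag with a split-on-backtick / unescape-even-segments / rejoin pipeline (code segments are identified by index parity instead of a running flag).
import Mathlib
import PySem

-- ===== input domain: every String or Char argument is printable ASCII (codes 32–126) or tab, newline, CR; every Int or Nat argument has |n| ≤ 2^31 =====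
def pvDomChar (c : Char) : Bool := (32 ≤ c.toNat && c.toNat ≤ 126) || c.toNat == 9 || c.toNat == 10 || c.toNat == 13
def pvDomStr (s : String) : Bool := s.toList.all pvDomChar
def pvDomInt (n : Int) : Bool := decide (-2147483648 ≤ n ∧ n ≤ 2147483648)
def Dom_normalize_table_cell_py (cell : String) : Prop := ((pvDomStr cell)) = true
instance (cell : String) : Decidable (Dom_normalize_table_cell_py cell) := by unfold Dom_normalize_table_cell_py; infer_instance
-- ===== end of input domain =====

-- B replaces A's per-character in_code state machine by an idiomatic split-on-backtick /
-- unescape-even-segments / rejoin pipeline; equal return value proved on the whole domain.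


-- ===== PORT A =====
-- ESCAPABLE = set("*_#[]")
def pvEscapable : PySem.Set Char := PySem.Set.ofList "*_#[]".toList

-- `cell[i+1] in ESCAPABLE` guarded by `i + 1 < n` (false when no next char exists)
def pvNextEscA : List Char → Bool
  | d :: _ => decide (d ∈ pvEscapable)
  | [] => false

-- A's while loop: index i becomes the remaining suffix, in_code is the Bool state
def pvLoopA (in_code : Bool) : List Char → List Char
  | [] => []
  | c :: rest =>
    if c = '`' then
      c :: pvLoopA (!in_code) rest
    else if in_code = false && c = '\\' && pvNextEscA rest then
      match rest with
      | d :: rest' => d :: pvLoopA in_code rest'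
      | [] => []
    else
      c :: pvLoopA in_code rest

def normalize_table_cell_py (cell : String) : String :=
  String.mk (pvLoopA false cell.toList)

-- ===== PORT B =====
-- `seg[j+1] in "*_#[]"` guarded by `j + 1 < n`
def pvNextEscB : List Char → Bool
  | d :: _ => decide (d ∈ "*_#[]".toList)
  | [] => false

-- B's helper `unescape`: one pass over a segment, no code-state
def pvUnesc : List Char → List Char
  | [] => []
  | c :: rest =>
    if c = '\\' && pvNextEscB rest then
      match rest with
      | d :: rest' => d :: pvUnesc rest'
      | [] => []
    else
      c :: pvUnesc rest

-- parts = cell.split("`"); "`".join(seg if k % 2 else unescape(seg) for k, seg in enumerate(parts))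
def normalize_table_cell_py_alt (cell : String) : String :=
  let parts := PySem.Chars.splitOn cell.toList ['`']
  String.mk (PySem.Chars.join ['`']
    ((PySem.List.enumerate parts).map (fun p =>
      if PySem.Int.mod p.1 2 ≠ 0 then p.2 else pvUnesc p.2)))

-- ===== PRECONDITION & SPEC =====
def Spec_normalize_table_cell_py (cell : String) (out : String) : Prop := out = normalize_table_cell_py_alt cell
instance (cell : String) (out : String) : Decidable (Spec_normalize_table_cell_py cell out) := by unfold Spec_normalize_table_cell_py; infer_instance

-- ===== CLAIM (what is proved, stated in full; the proofs are below) =====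
def Claim_equal_normalize_table_cell_py : Prop := ∀ (cell : String), Dom_normalize_table_cell_py cell → Spec_normalize_table_cell_py cell (normalize_table_cell_py cell)

-- ===== LEMMAS AND PROOFS =====

-- reference split on '`' (structural form of PySem.Chars.splitOn for this separator)
def pvSplit : List Char → List (List Char)
  | [] => [[]]
  | c :: rest =>
    if c = '`' then [] :: pvSplit rest
    else (pvSplit rest).modifyHead (fun h => c :: h)

theorem pvSplit_ne_nil (l : List Char) : pvSplit l ≠ [] := by
  cases l with
  | nil => simp [pvSplit]
  | cons c rest =>
    simp only [pvSplit]
    split_ifs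
    · simp
    · cases h : pvSplit rest with
      | nil => exact absurd h (pvSplit_ne_nil rest)
      | cons a t => simp

theorem pvModifyHead_id (xs : List (List Char)) : List.modifyHead (fun h => h) xs = xs := by
  cases xs <;> rfl

theorem pvGo_eq (fuel : Nat) : ∀ (l cur : List Char) (accs : List (List Char)),
    l.length < fuel →
    PySem.Chars.splitOn.go ['`'] fuel l cur accs =
      accs.reverse ++ (pvSplit l).modifyHead (fun h => cur.reverse ++ h) := by
  induction fuel with
  | zero => intro l cur accs h; omega
  | succ f ih =>
    intro l cur accs h
    cases l with
    | nil => simp [PySem.Chars.splitOn.go, pvSplit]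
    | cons c rest =>
      by_cases hc : c = '`'
      · subst hc
        simp only [PySem.Chars.splitOn.go, List.isPrefixOf, beq_self_eq_true, Bool.true_and,
          if_true]
        rw [show List.drop ['`'].length ('`' :: rest) = rest from rfl,
          ih rest [] (cur.reverse :: accs) (by simpa using Nat.lt_of_succ_lt_succ h)]
        simp [pvSplit, pvModifyHead_id]
      · have hpre : (['`'].isPrefixOf (c :: rest)) = false := by
          simp only [List.isPrefixOf, Bool.and_true, beq_eq_false_iff_ne, ne_eq]
          exact fun hx => hc hx.symm
        simp only [PySem.Chars.splitOn.go, hpre, Bool.false_eq_true, if_false]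
        rw [ih rest (c :: cur) accs (by simpa using Nat.lt_of_succ_lt_succ h)]
        cases hs : pvSplit rest with
        | nil => exact absurd hs (pvSplit_ne_nil rest)
        | cons a t => simp [pvSplit, hc, hs]

theorem pvSplitOn_eq (l : List Char) : PySem.Chars.splitOn l ['`'] = pvSplit l := by
  have := pvGo_eq (l.length + 1) l [] [] (by omega)
  simpa [PySem.Chars.splitOn, pvModifyHead_id] using this

-- parity map: apply pvUnesc to the pieces outside inline code (b = currently inside code)
def pvAltMap : Bool → List (List Char) → List (List Char)
  | _, [] => []
  | b, p :: ps => (if b then p else pvUnesc p) :: pvAltMap (!b) ps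

theorem pvEnumMap (parts : List (List Char)) : ∀ (s : Nat),
    (PySem.List.enumerate parts (s : Int)).map
        (fun p => if PySem.Int.mod p.1 2 ≠ 0 then p.2 else pvUnesc p.2) =
      pvAltMap (decide (s % 2 = 1)) parts := by
  induction parts with
  | nil => intro s; simp [PySem.List.enumerate_nil, pvAltMap]
  | cons p ps ih =>
    intro s
    have h2 : PySem.Int.mod (s : Int) 2 = ((s % 2 : Nat) : Int) := by
      rw [PySem.Int.mod_eq_emod_of_pos (by omega)]
      push_cast
      rfl
    have hs : ((s : Int) + 1) = (((s + 1 : Nat)) : Int) := by push_cast; ring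
    rw [PySem.List.enumerate_cons, List.map_cons, hs, ih (s + 1), h2]
    rcases Nat.mod_two_eq_zero_or_one s with h | h <;>
      simp [pvAltMap, h, Nat.add_mod]

theorem pvJoin_cons_head (c : Char) (h : List Char) (t : List (List Char)) :
    PySem.Chars.join ['`'] ((c :: h) :: t) = c :: PySem.Chars.join ['`'] (h :: t) := by
  cases t with
  | nil => simp [PySem.Chars.join_singleton]
  | cons q qs => simp [PySem.Chars.join_cons_cons]

theorem pvEscapable_eq : pvEscapable = "*_#[]".toList := by decide

theorem pvMemEsc (d : Char) : (d ∈ pvEscapable) ↔ d ∈ "*_#[]".toList := by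
  rw [pvEscapable_eq]

theorem pvNextEscA_nil : pvNextEscA [] = false := rfl
theorem pvNextEscA_cons (d : Char) (xs : List Char) :
    pvNextEscA (d :: xs) = decide (d ∈ pvEscapable) := rfl
theorem pvNextEscB_nil : pvNextEscB [] = false := rfl
theorem pvNextEscB_cons (d : Char) (xs : List Char) :
    pvNextEscB (d :: xs) = decide (d ∈ "*_#[]".toList) := rfl
theorem pvUnesc_nil : pvUnesc [] = [] := rfl

theorem pvUnesc_cons_of_not_esc (c : Char) (h : List Char)
    (hne : (c = '\\' && pvNextEscB h) = false) :
    pvUnesc (c :: h) = c :: pvUnesc h := by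
  rw [pvUnesc.eq_def]
  simp [hne]

theorem pvUnesc_esc (d : Char) (h : List Char) (hd : d ∈ "*_#[]".toList) :
    pvUnesc ('\\' :: d :: h) = d :: pvUnesc h := by
  rw [pvUnesc.eq_def]
  dsimp only
  have h1 : pvNextEscB (d :: h) = true := by
    rw [pvNextEscB_cons]; exact decide_eq_true hd
  rw [h1]
  simp

theorem pvUnesc_cons_head (c : Char) (rest : List Char)
    (hne : ¬(c = '\\' ∧ pvNextEscA rest = true)) :
    ∀ h t, pvSplit rest = h :: t → pvUnesc (c :: h) = c :: pvUnesc h := by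
  intro h t hsp
  by_cases hb : c = '\\'
  · subst hb
    have hA : pvNextEscA rest = false := by
      cases hx : pvNextEscA rest
      · rfl
      · exact absurd ⟨rfl, hx⟩ hne
    cases rest with
    | nil =>
      simp only [pvSplit] at hsp
      cases hsp
      exact pvUnesc_cons_of_not_esc _ _ (by simp [pvNextEscB_nil])
    | cons r rest2 =>
      have hr : ¬ r ∈ "*_#[]".toList := by
        rw [pvNextEscA_cons, decide_eq_false_iff_not] at hA
        exact fun hm => hA ((pvMemEsc r).mpr hm)
      by_cases hrt : r = '`'
      · subst hrt
        simp only [pvSplit] at hsp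
        cases hsp
        exact pvUnesc_cons_of_not_esc _ _ (by simp [pvNextEscB_nil])
      · simp only [pvSplit, if_neg hrt] at hsp
        cases hq : pvSplit rest2 with
        | nil => exact absurd hq (pvSplit_ne_nil rest2)
        | cons h2 t2 =>
          rw [hq] at hsp
          simp only [List.modifyHead] at hsp
          cases hsp
          exact pvUnesc_cons_of_not_esc _ _
            (by rw [pvNextEscB_cons, decide_eq_false hr]; simp)
  · exact pvUnesc_cons_of_not_esc _ _ (by simp [hb])

theorem pvLoopA_tick (b : Bool) (rest : List Char) :
    pvLoopA b ('`' :: rest) = '`' :: pvLoopA (!b) rest := by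
  rw [pvLoopA.eq_def]
  dsimp only
  simp

theorem pvLoopA_esc (d : Char) (rest2 : List Char) (hd : d ∈ pvEscapable) :
    pvLoopA false ('\\' :: d :: rest2) = d :: pvLoopA false rest2 := by
  rw [pvLoopA.eq_def]
  dsimp only
  have h1 : pvNextEscA (d :: rest2) = true := by
    rw [pvNextEscA_cons]; exact decide_eq_true hd
  rw [h1]
  simp

theorem pvLoopA_plain (b : Bool) (c : Char) (rest : List Char) (hc : c ≠ '`')
    (hne : (decide (b = false) && decide (c = '\\') && pvNextEscA rest) = false) :
    pvLoopA b (c :: rest) = c :: pvLoopA b rest := by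
  rw [pvLoopA.eq_def]
  dsimp only
  rw [if_neg hc, hne]
  simp

theorem pvAltMap_out (p : List Char) (ps : List (List Char)) :
    pvAltMap false (p :: ps) = pvUnesc p :: pvAltMap true ps := rfl

theorem pvAltMap_in (p : List Char) (ps : List (List Char)) :
    pvAltMap true (p :: ps) = p :: pvAltMap false ps := rfl

theorem pvSplit_plain (c : Char) (rest : List Char) (hc : c ≠ '`') :
    pvSplit (c :: rest) = (pvSplit rest).modifyHead (fun h => c :: h) := by
  simp [pvSplit, hc]

theorem pvMain : ∀ (n : Nat) (cs : List Char), cs.length ≤ n → ∀ (b : Bool),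
    pvLoopA b cs = PySem.Chars.join ['`'] (pvAltMap b (pvSplit cs)) := by
  intro n
  induction n with
  | zero =>
    intro cs hl b
    have : cs = [] := List.eq_nil_of_length_eq_zero (Nat.le_zero.mp hl)
    subst this
    cases b <;> simp [pvLoopA, pvSplit, pvAltMap, pvUnesc_nil, PySem.Chars.join_singleton]
  | succ n ih =>
    intro cs hl b
    cases cs with
    | nil =>
      cases b <;> simp [pvLoopA, pvSplit, pvAltMap, pvUnesc_nil, PySem.Chars.join_singleton]
    | cons c rest =>
      have hrl : rest.length ≤ n := by simpa using Nat.le_of_succ_le_succ hl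
      by_cases hc : c = '`'
      · subst hc
        rw [pvLoopA_tick, ih rest hrl (!b)]
        have hsp : pvSplit ('`' :: rest) = [] :: pvSplit rest := by simp [pvSplit]
        rw [hsp]
        cases hs : pvSplit rest with
        | nil => exact absurd hs (pvSplit_ne_nil rest)
        | cons h0 t0 =>
          cases b <;>
            simp [pvAltMap_out, pvAltMap_in, PySem.Chars.join_cons_cons, pvUnesc_nil]
      · by_cases hesc : b = false ∧ c = '\\' ∧ pvNextEscA rest = true
        · obtain ⟨hb0, hbs, hA⟩ := hesc
          subst hb0; subst hbs
          cases rest with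
          | nil => simp [pvNextEscA_nil] at hA
          | cons d rest2 =>
            have hd : d ∈ pvEscapable := by
              rw [pvNextEscA_cons, decide_eq_true_eq] at hA
              exact hA
            have hdl : d ∈ "*_#[]".toList := (pvMemEsc d).mp hd
            have hdt : d ≠ '`' := by
              intro hx; subst hx; simp at hdl
            have hr2 : rest2.length ≤ n := by
              simp at hrl; omega
            rw [pvLoopA_esc d rest2 hd, ih rest2 hr2 false]
            rw [pvSplit_plain _ _ hc, pvSplit_plain _ _ hdt]
            cases hs : pvSplit rest2 with
            | nil => exact absurd hs (pvSplit_ne_nil rest2)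
            | cons h0 t0 =>
              simp only [List.modifyHead]
              rw [pvAltMap_out, pvAltMap_out, pvUnesc_esc d h0 hdl, pvJoin_cons_head]
        · have hneb : (decide (b = false) && decide (c = '\\') && pvNextEscA rest) = false := by
            cases hx1 : decide (b = false) <;> cases hx2 : decide (c = '\\') <;>
              cases hx3 : pvNextEscA rest <;> simp_all
          rw [pvLoopA_plain b c rest hc hneb, ih rest hrl b, pvSplit_plain _ _ hc]
          cases hs : pvSplit rest with
          | nil => exact absurd hs (pvSplit_ne_nil rest)
          | cons h0 t0 =>
            simp only [List.modifyHead]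
            cases b
            · have hne2 : ¬(c = '\\' ∧ pvNextEscA rest = true) := by
                intro hx; exact hesc ⟨rfl, hx.1, hx.2⟩
              rw [pvAltMap_out, pvAltMap_out,
                pvUnesc_cons_head c rest hne2 h0 t0 hs, pvJoin_cons_head]
            · rw [pvAltMap_in, pvAltMap_in, pvJoin_cons_head]

-- ===== VERDICT (by name: the statement is the Claim_ definition above) =====
theorem normalize_table_cell_py_spec : Claim_equal_normalize_table_cell_py := by
  intro cell _
  unfold Spec_normalize_table_cell_py normalize_table_cell_py normalize_table_cell_py_alt
  have he := pvEnumMap (pvSplit cell.toList) 0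
  simp only [Nat.cast_zero] at he
  simp only [pvSplitOn_eq, he, show decide ((0:Nat) % 2 = 1) = false by decide]
  rw [pvMain cell.toList.length cell.toList le_rfl false]
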